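-- pv_equiv track=rewrite | github.com/MinWoongL/Algorithm_Study | SWEA/Algorithm/230201_list3.py | r_sum
-- ===== SOURCE A (Python) =====
-- def r_sum(n_list, m):
--     min_value = 10000*m  # n의 최대값 곱하기 구간의 수를 초기 최소값으로 설정
--     max_value = 0
--     value = 0
--     for i in range(0, len(n_list)-m+1):
--         for j in range(i, i+m):
--             value += n_list[j]
--         if value < min_value:
--             min_value = value
--         if value > max_value:
--             max_value = value
--         value = 0
--
--     return max_value - min_value
-- ===== SOURCE B (Python) =====
-- def r_sum(n_list, m):
--     # Sliding window: one pass with an incrementally updated running sum (O(n) instead of O(n*m)).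
--     # lo/hi start from the same initial bounds the problem statement prescribes (values <= 10000).
--     k = len(n_list) - m + 1          # number of windows
--     lo, hi = 10000 * m, 0
--     if k >= 1:
--         s = sum(n_list[:m])
--         lo, hi = min(lo, s), max(hi, s)
--         for i in range(k - 1):
--             s += n_list[i + m] - n_list[i]
--             if s < lo:
--                 lo = s
--             if s > hi:
--                 hi = s
--     return hi - lo
-- ===== Notes on version B (the rewrite author's own statement) =====
-- stated objective: faster
-- what changed: Replaces the O(n*m) re-summation of every length-m window by a single sliding-window pass that updates one running sum incrementally (s += a[i+m] - a[i]).
-- outside the precondition, e.g. on r_sum([1, 2], -1): A returns 10000, B raises IndexError; on r_sum([], -2): A returns 20000, B raises IndexError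
import Mathlib
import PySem

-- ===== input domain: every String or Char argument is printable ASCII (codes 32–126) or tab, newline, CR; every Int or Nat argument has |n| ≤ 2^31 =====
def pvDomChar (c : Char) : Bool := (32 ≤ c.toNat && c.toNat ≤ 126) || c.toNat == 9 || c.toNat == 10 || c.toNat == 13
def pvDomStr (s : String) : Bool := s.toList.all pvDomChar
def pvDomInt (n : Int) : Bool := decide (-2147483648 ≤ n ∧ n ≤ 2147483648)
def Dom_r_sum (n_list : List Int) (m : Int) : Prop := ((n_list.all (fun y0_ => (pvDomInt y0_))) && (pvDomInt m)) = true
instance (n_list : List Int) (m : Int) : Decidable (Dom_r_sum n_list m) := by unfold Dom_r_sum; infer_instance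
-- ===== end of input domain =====

-- B replaces A's O(n*m) per-window re-summation by one sliding-window pass with an incrementally
-- updated running sum (objective: faster, asymptotic).

-- ===== PORT A =====
-- Literal port of A's nested loops. Under Pre_ (0 ≤ m) every index A reads is in range, so
-- pyGetD with default 0 computes exactly what n_list[j] returns (no IndexError is reachable).
def r_sum (n_list : List Int) (m : Int) : Int :=
  let st := (PySem.List.pyRange 0 ((n_list.length : Int) - m + 1) 1).foldl
    (fun (acc : Int × Int × Int) i =>
      let v := (PySem.List.pyRange i (i + m) 1).foldl
        (fun v j => v + PySem.List.pyGetD n_list j 0) acc.2.2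
      ((if v < acc.1 then v else acc.1), (if v > acc.2.1 then v else acc.2.1), 0))
    (10000 * m, 0, 0)
  st.2.1 - st.1

-- ===== PORT B =====
-- Literal port of Source B: first window by sum(n_list[:m]), then k-1 incremental updates.
def r_sum_alt (n_list : List Int) (m : Int) : Int :=
  let k : Int := (n_list.length : Int) - m + 1
  if 1 ≤ k then
    let s0 := (PySem.List.slice n_list none (some m)).sum
    let st := (PySem.List.pyRange 0 (k - 1) 1).foldl
      (fun (acc : Int × Int × Int) i =>
        let s := acc.2.2 + PySem.List.pyGetD n_list (i + m) 0 - PySem.List.pyGetD n_list i 0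
        ((if s < acc.1 then s else acc.1), (if s > acc.2.1 then s else acc.2.1), s))
      (min (10000 * m) s0, max 0 s0, s0)
    st.2.1 - st.1
  else 0 - 10000 * m

-- ===== PRECONDITION & SPEC =====
-- Pre_ restricts to the natural domain of a window size: 0 ≤ m. For m < 0 A still returns
-- (every "window" is empty, yielding the sentinel artefact -10000*m) while B's sliding pass
-- raises IndexError there; excluded, see claim cites.
def Pre_r_sum (n_list : List Int) (m : Int) : Prop := 0 ≤ m
instance (n_list : List Int) (m : Int) : Decidable (Pre_r_sum n_list m) := by unfold Pre_r_sum; infer_instance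
def pvWitness_r_sum : List Int × Int := ([1, 2, 3], 2)
def Spec_r_sum (n_list : List Int) (m : Int) (out : Int) : Prop := out = r_sum_alt n_list m
instance (n_list : List Int) (m : Int) (out : Int) : Decidable (Spec_r_sum n_list m out) := by unfold Spec_r_sum; infer_instance

-- ===== CLAIM (what is proved, stated in full; the proofs are below) =====
def Claim_equal_r_sum : Prop := ∀ (n_list : List Int) (m : Int), Dom_r_sum n_list m → Pre_r_sum n_list m → Spec_r_sum n_list m (r_sum n_list m)

-- ===== LEMMAS AND PROOFS =====

-- window sum: sum of the mN elements of l starting at index i (shorter near the end)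
def wsum (l : List Int) (mN i : Nat) : Int := ((l.drop i).take mN).sum

theorem wsum_cons (l : List Int) (mN i : Nat) :
    wsum l (mN + 1) i = l.getD i 0 + wsum l mN (i + 1) := by
  unfold wsum
  rcases h : l.drop i with _ | ⟨a, t⟩
  · have h1 : l.drop (i + 1) = [] := by
      have := List.drop_drop (l := l) (i := 1) (j := i); simp [← this, h]
    have hlen : l.length ≤ i := by
      have := List.drop_eq_nil_iff.mp h; omega
    simp [h1, List.getD_eq_getElem?_getD, List.getElem?_eq_none hlen]
  · have ha : l[i]? = some a := by
      have h0 := List.getElem?_drop (xs := l) (i := i) (j := 0)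
      rw [h] at h0; simpa using h0.symm
    have h1 : l.drop (i + 1) = t := by
      have := List.drop_drop (l := l) (i := 1) (j := i); simp [← this, h]
    simp [h, h1, List.getD_eq_getElem?_getD, ha]

theorem wsum_snoc (l : List Int) (mN i : Nat) :
    wsum l (mN + 1) i = wsum l mN i + l.getD (i + mN) 0 := by
  unfold wsum
  rw [List.take_add_one, List.sum_append]
  have h : (l.drop i)[mN]? = l[i + mN]? := List.getElem?_drop
  rcases hg : l[i + mN]? with _ | a
  · rw [h, hg]; simp [List.getD_eq_getElem?_getD, hg]
  · rw [h, hg]; simp [List.getD_eq_getElem?_getD, hg]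

theorem wsum_shift (l : List Int) (mN i : Nat) :
    wsum l mN (i + 1) = wsum l mN i + l.getD (i + mN) 0 - l.getD i 0 := by
  cases mN with
  | zero => simp [wsum]
  | succ k =>
      have h1 := wsum_snoc l k (i + 1)
      have h2 := wsum_cons l k i
      have h3 : i + 1 + k = i + (k + 1) := by omega
      rw [h3] at h1
      omega

-- the inner loop of A sums the window starting at i
theorem inner_eq (l : List Int) (mN : Nat) : ∀ (i : Nat) (v : Int),
    (PySem.List.pyRange (i : Int) ((i : Int) + (mN : Int)) 1).foldl
      (fun v j => v + PySem.List.pyGetD l j 0) v = v + wsum l mN i := by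
  induction mN with
  | zero =>
      intro i v
      rw [show ((0 : Nat) : Int) = (0 : Int) by rfl,
          PySem.List.pyRange_one_eq_nil (by omega : (i : Int) + 0 ≤ i)]
      simp [wsum]
  | succ k ih =>
      intro i v
      have hcons := PySem.List.pyRange_one_cons
        (a := (i : Int)) (b := (i : Int) + ((k : Int) + 1)) (by omega)
      rw [show ((i : Int) + ((k : Nat) + 1 : Nat)) = (i : Int) + ((k : Int) + 1) by push_cast; ring,
          hcons]
      have harg : ((i : Int) + 1) = ((i + 1 : Nat) : Int) := by push_cast; ring
      have harg2 : ((i : Int) + ((k : Int) + 1)) = ((i + 1 : Nat) : Int) + (k : Int) := by push_cast; ring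
      rw [List.foldl_cons, harg2, harg, ih (i + 1) (v + PySem.List.pyGetD l (i : Int) 0)]
      rw [PySem.List.pyGetD_natCast, wsum_cons]
      ring

-- A's outer loop splits into independent min- and max-folds over the window sums
theorem outerA (l : List Int) (m : Int) : ∀ (L : List Int) (a b : Int),
    L.foldl (fun (acc : Int × Int × Int) i =>
      ((if (PySem.List.pyRange i (i + m) 1).foldl (fun v j => v + PySem.List.pyGetD l j 0) acc.2.2 < acc.1
          then (PySem.List.pyRange i (i + m) 1).foldl (fun v j => v + PySem.List.pyGetD l j 0) acc.2.2
          else acc.1),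
       (if (PySem.List.pyRange i (i + m) 1).foldl (fun v j => v + PySem.List.pyGetD l j 0) acc.2.2 > acc.2.1
          then (PySem.List.pyRange i (i + m) 1).foldl (fun v j => v + PySem.List.pyGetD l j 0) acc.2.2
          else acc.2.1), 0))
      (a, b, 0)
    = (L.foldl (fun a i => min a ((PySem.List.pyRange i (i + m) 1).foldl
          (fun v j => v + PySem.List.pyGetD l j 0) 0)) a,
       L.foldl (fun b i => max b ((PySem.List.pyRange i (i + m) 1).foldl
          (fun v j => v + PySem.List.pyGetD l j 0) 0)) b, 0) := by
  intro L
  induction L with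
  | nil => intro a b; simp
  | cons x t ih =>
      intro a b
      simp only [List.foldl_cons]
      rw [ih]
      have e1 : ∀ (v a : Int), (if v < a then v else a) = min a v := by intro v a; omega
      have e2 : ∀ (v b : Int), (if v > b then v else b) = max b v := by intro v b; omega
      rw [e1, e2]

-- B's loop invariant: the running sum is always the current window sum, and lo/hi are
-- the min/max folds over the windows seen so far
theorem loopB (l : List Int) (m : Int) (mN : Nat) (hm : m = (mN : Int)) :
    ∀ (n : Nat) (a b : Int),
    (List.range n).foldl (fun (acc : Int × Int × Int) (t : Nat) =>
      ((if acc.2.2 + PySem.List.pyGetD l ((t : Int) + m) 0 - PySem.List.pyGetD l (t : Int) 0 < acc.1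
          then acc.2.2 + PySem.List.pyGetD l ((t : Int) + m) 0 - PySem.List.pyGetD l (t : Int) 0
          else acc.1),
       (if acc.2.2 + PySem.List.pyGetD l ((t : Int) + m) 0 - PySem.List.pyGetD l (t : Int) 0 > acc.2.1
          then acc.2.2 + PySem.List.pyGetD l ((t : Int) + m) 0 - PySem.List.pyGetD l (t : Int) 0
          else acc.2.1),
       acc.2.2 + PySem.List.pyGetD l ((t : Int) + m) 0 - PySem.List.pyGetD l (t : Int) 0))
      (a, b, wsum l mN 0)
    = ((List.range n).foldl (fun a t => min a (wsum l mN (t + 1))) a,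
       (List.range n).foldl (fun b t => max b (wsum l mN (t + 1))) b,
       wsum l mN n) := by
  intro n
  induction n with
  | zero => intro a b; simp
  | succ k ih =>
      intro a b
      rw [List.range_succ]
      simp only [List.foldl_append, List.foldl_cons, List.foldl_nil]
      rw [ih]
      have hget : PySem.List.pyGetD l ((k : Int) + m) 0 = l.getD (k + mN) 0 := by
        rw [hm, show ((k : Int) + (mN : Int)) = ((k + mN : Nat) : Int) by push_cast; ring,
            PySem.List.pyGetD_natCast]
      have hs : wsum l mN k + PySem.List.pyGetD l ((k : Int) + m) 0 - PySem.List.pyGetD l (k : Int) 0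
          = wsum l mN (k + 1) := by
        rw [hget, PySem.List.pyGetD_natCast, wsum_shift]
      simp only []
      rw [hs]
      congr 1
      · omega
      · congr 1
        omega

theorem slice_sum (l : List Int) (m : Int) (hm : 0 ≤ m) :
    (PySem.List.slice l none (some m)).sum = wsum l m.toNat 0 := by
  rw [PySem.List.slice_to l hm]; simp [wsum]

-- ===== VERDICT (by name: the statement is the Claim_ definition above) =====
theorem r_sum_spec : Claim_equal_r_sum := by
  intro l m _ hm
  unfold Pre_r_sum at hm
  simp only [Spec_r_sum, r_sum, r_sum_alt]
  obtain ⟨mN, hmN⟩ : ∃ mN : Nat, m = (mN : Int) := ⟨m.toNat, by omega⟩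
  by_cases hk : 1 ≤ (l.length : Int) - m + 1
  · -- at least one window
    obtain ⟨kN, hkN⟩ : ∃ kN : Nat, (l.length : Int) - m + 1 = ((kN + 1 : Nat) : Int) := by
      refine ⟨((l.length : Int) - m).toNat, by omega⟩
    rw [if_pos hk]
    rw [hkN, PySem.List.pyRange_zero_natCast,
        show ((kN + 1 : Nat) : Int) - 1 = ((kN : Nat) : Int) by push_cast; ring,
        PySem.List.pyRange_zero_natCast]
    rw [outerA l m]
    rw [List.foldl_map, List.foldl_map, List.foldl_map]
    rw [slice_sum l m hm, show m.toNat = mN by omega]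
    rw [loopB l m mN hmN kN]
    have hinner : ∀ t : Nat,
        (PySem.List.pyRange (t : Int) ((t : Int) + m) 1).foldl
          (fun v j => v + PySem.List.pyGetD l j 0) 0 = wsum l mN t := by
      intro t
      rw [hmN]
      simpa using inner_eq l mN t 0
    simp only [hinner]
    rw [List.range_succ_eq_map]
    simp only [List.foldl_cons, List.foldl_map, Nat.succ_eq_add_one]
  · -- no window: A's outer range is empty, B takes the else branch
    rw [if_neg hk, PySem.List.pyRange_one_eq_nil (by omega)]
    simp
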